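-- pv_equiv track=rewrite | github.com/MihailMihaylov75/algorithms | recursion.py | word_split
-- ===== SOURCE A (Python) =====
-- def word_split(phrase, list_of_word, output=None):
--     """Determine if it is possible to split the string in a way in which words can be made from the list of words"""
--     # if output is None initialize it
--     if output is None:
--         output = []
--
--     for word in list_of_word:
--         # if the word is found append it to the output
--         if phrase.startswith(word):
--             output.append(word)
--             # recursively call the split function on the remaining portion of the phrase
--             return word_split(phrase[len(word):], list_of_word, output)
--     return output
-- ===== SOURCE B (Python) =====
-- def word_split(phrase, list_of_word, output=None):
--     """Greedily split phrase into prefix words from the list (iterative).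
--     Mutates a passed-in output list exactly like the original."""
--     out = [] if output is None else output
--     while True:
--         word = next((w for w in list_of_word if phrase.startswith(w)), None)
--         if word is None:
--             return out
--         out.append(word)
--         phrase = phrase[len(word):]
-- ===== Notes on version B (the rewrite author's own statement) =====
-- stated objective: idiomatic
-- what changed: Replaced the recursion (with an inline for-loop and recursive tail call) by an iterative while-loop whose inner scan is a next(...) first-match lookup, rebinding phrase and appending to the output each round.
-- outside the precondition, e.g. on word_split('ab', ['', 'a'], None): A raises RecursionError, B does not finish within the time limit
import Mathlib
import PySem

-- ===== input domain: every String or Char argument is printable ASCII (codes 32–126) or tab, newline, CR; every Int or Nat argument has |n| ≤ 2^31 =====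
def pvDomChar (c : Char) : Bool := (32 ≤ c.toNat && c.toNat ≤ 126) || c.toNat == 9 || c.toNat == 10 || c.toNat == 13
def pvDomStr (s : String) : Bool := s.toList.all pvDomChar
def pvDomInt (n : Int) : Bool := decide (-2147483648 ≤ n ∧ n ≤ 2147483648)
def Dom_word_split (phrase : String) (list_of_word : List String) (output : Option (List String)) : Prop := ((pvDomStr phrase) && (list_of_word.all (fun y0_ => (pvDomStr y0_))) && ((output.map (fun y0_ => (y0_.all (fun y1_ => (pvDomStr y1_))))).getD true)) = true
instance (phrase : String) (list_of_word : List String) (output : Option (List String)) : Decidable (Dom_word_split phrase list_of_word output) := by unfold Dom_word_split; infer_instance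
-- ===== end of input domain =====

-- B replaces A's recursion by an iterative first-match loop (same greedy result); equivalence is about the
-- RETURN value only — both Pythons append to a caller-supplied output list in place.


-- ===== PORT A =====
-- A is recursive; the recursion terminates on Pre_ (no empty word) because each matched word strips >= 1
-- character, so fuel = len(phrase) + 1 suffices and is never exhausted inside Pre_.
-- the 'for word in list_of_word:' loop with its early return; `recur` is A's recursive call
def scanA (recur : String → List String → List String) (phrase : String) : List String → List String → List String
  | [], out => out
  | w :: ws, out =>
    if PySem.Str.startswith phrase w then
      recur (PySem.Str.slice phrase (some ((PySem.Str.len w : Int))) none) (out ++ [w])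
    else scanA recur phrase ws out

def wsA : Nat → String → List String → List String → List String
  | 0, _, _, out => out
  | f + 1, phrase, words, out => scanA (fun p o => wsA f p words o) phrase words out

def word_split (phrase : String) (list_of_word : List String) (output : Option (List String)) : List String :=
  wsA (phrase.toList.length + 1) phrase list_of_word (output.getD [])

-- ===== PORT B =====
-- next((w for w in list_of_word if phrase.startswith(w)), None)
def firstMatchB (phrase : String) : List String → Option String
  | [] => none
  | w :: ws => if PySem.Str.startswith phrase w then some w else firstMatchB phrase ws

-- the 'while True:' loop, state (phrase, out); same fuel bound as A's recursion
def loopB (fuel : Nat) (phrase : String) (words : List String) (out : List String) : List String :=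
  match fuel with
  | 0 => out
  | f + 1 =>
    match firstMatchB phrase words with
    | none => out
    | some w => loopB f (PySem.Str.slice phrase (some ((PySem.Str.len w : Int))) none) words (out ++ [w])

def word_split_alt (phrase : String) (list_of_word : List String) (output : Option (List String)) : List String :=
  loopB (phrase.toList.length + 1) phrase list_of_word (output.getD [])

-- ===== PRECONDITION & SPEC =====
-- Pre_ excludes lists containing the empty word: there phrase.startswith('') always holds, so Python A
-- recurses forever (RecursionError) and B's while-loop never terminates.
def Pre_word_split (phrase : String) (list_of_word : List String) (output : Option (List String)) : Prop :=
  "" ∉ list_of_word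
instance (phrase : String) (list_of_word : List String) (output : Option (List String)) : Decidable (Pre_word_split phrase list_of_word output) := by unfold Pre_word_split; infer_instance
def pvWitness_word_split : String × List String × Option (List String) := ("themanran", ["the", "ran", "man"], none)

def Spec_word_split (phrase : String) (list_of_word : List String) (output : Option (List String)) (out : List String) : Prop := out = word_split_alt phrase list_of_word output
instance (phrase : String) (list_of_word : List String) (output : Option (List String)) (out : List String) : Decidable (Spec_word_split phrase list_of_word output out) := by unfold Spec_word_split; infer_instance

-- ===== CLAIM (what is proved, stated in full; the proofs are below) =====
def Claim_equal_word_split : Prop := ∀ (phrase : String) (list_of_word : List String) (output : Option (List String)), Dom_word_split phrase list_of_word output → Pre_word_split phrase list_of_word output → Spec_word_split phrase list_of_word output (word_split phrase list_of_word output)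

-- ===== LEMMAS AND PROOFS =====
-- A's inner for-loop equals: first match, then the recursive call.
theorem scanA_eq (recur : String → List String → List String) (phrase : String) :
    ∀ (rem out : List String), scanA recur phrase rem out =
      match firstMatchB phrase rem with
      | none => out
      | some w => recur (PySem.Str.slice phrase (some ((PySem.Str.len w : Int))) none) (out ++ [w]) := by
  intro rem
  induction rem with
  | nil => intro out; simp [scanA, firstMatchB]
  | cons w ws ih =>
    intro out
    by_cases h : PySem.Str.startswith phrase w
    · simp only [scanA, firstMatchB, h, if_pos]
    · simp only [scanA, firstMatchB, h, if_neg, Bool.false_eq_true, not_false_iff, ih]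

theorem wsA_eq_loopB (fuel : Nat) :
    ∀ (phrase : String) (words out : List String), wsA fuel phrase words out = loopB fuel phrase words out := by
  induction fuel with
  | zero => intro phrase words out; simp [wsA, loopB]
  | succ f ih =>
    intro phrase words out
    rw [wsA, loopB, scanA_eq]
    cases firstMatchB phrase words with
    | none => rfl
    | some w => exact ih _ _ _

-- ===== VERDICT (by name: the statement is the Claim_ definition above) =====
theorem word_split_spec : Claim_equal_word_split := by
  intro phrase list_of_word output _ _
  unfold Spec_word_split word_split word_split_alt
  exact wsA_eq_loopB _ _ _ _
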